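-- pv_equiv track=rewrite | github.com/youbbin/algorithm-study | 프로그래머스/1/42862. 체육복/체육복.py | solution
-- ===== SOURCE A (Python) =====
-- def solution(n, lost, reserve):
--     lost_set = set(lost)
--     reserve_set = set(reserve)
--
--     # 여벌이 있지만 도난당한 경우 제거
--     intersect = lost_set & reserve_set
--     lost_set -= intersect
--     reserve_set -= intersect
--
--     for student in sorted(lost_set):
--         if student - 1 in reserve_set:
--             reserve_set.remove(student - 1)
--         elif student + 1 in reserve_set:
--             reserve_set.remove(student + 1)
--         else:
--             continue
--         lost_set.remove(student)
--
--     return n - len(lost_set)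
-- ===== SOURCE B (Python) =====
-- def solution(n, lost, reserve):
--     # Two-pointer merge over the two sorted (deduped, cancelled) lists:
--     # each spare is visited once, no per-student set membership tests/removals.
--     ls = sorted(set(lost) - set(reserve))
--     rs = sorted(set(reserve) - set(lost))
--     matched = 0
--     i = j = 0
--     while i < len(ls) and j < len(rs):
--         if rs[j] < ls[i] - 1:
--             j += 1
--         elif rs[j] <= ls[i] + 1:
--             matched += 1
--             i += 1
--             j += 1
--         else:
--             i += 1
--     return n - (len(ls) - matched)
-- ===== Notes on version B (the rewrite author's own statement) =====
-- stated objective: alternative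
-- what changed: Replaces A's greedy that repeatedly tests/removes student-1 and student+1 in a hash set with a classic two-pointer linear merge of the two sorted cancelled lists (lost-only and reserve-only), advancing whichever pointer is behind and counting matches; no membership tests or set removals remain.
import Mathlib
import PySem

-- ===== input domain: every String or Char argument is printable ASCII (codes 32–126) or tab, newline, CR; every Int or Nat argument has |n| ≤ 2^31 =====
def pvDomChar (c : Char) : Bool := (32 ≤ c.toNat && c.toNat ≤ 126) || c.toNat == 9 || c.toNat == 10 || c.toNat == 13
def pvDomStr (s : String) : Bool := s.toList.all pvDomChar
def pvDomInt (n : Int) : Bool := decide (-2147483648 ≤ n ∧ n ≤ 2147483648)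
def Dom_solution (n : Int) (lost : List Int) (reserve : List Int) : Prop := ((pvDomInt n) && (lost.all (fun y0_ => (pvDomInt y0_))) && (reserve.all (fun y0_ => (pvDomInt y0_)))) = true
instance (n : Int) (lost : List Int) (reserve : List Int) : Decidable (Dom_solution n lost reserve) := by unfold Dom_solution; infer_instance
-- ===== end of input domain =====

-- B replaces A's per-student set membership/removal greedy by a two-pointer merge of the two
-- sorted cancelled lists (objective: alternative, same asymptotic cost).

-- ===== PORT A =====
-- loop body of A's 'for student in sorted(lost_set)'; state = (lost_set, reserve_set).
-- Python's set.remove is ported as Set.discard: both branches remove an element that is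
-- provably present (the guard, resp. student ∈ sorted(lost_set) with no duplicates), so
-- remove never raises and equals discard there.
def solutionLoop (st : PySem.Set Int × PySem.Set Int) (student : Int) : PySem.Set Int × PySem.Set Int :=
  if student - 1 ∈ st.2 then
    (PySem.Set.discard st.1 student, PySem.Set.discard st.2 (student - 1))
  else if student + 1 ∈ st.2 then
    (PySem.Set.discard st.1 student, PySem.Set.discard st.2 (student + 1))
  else st

def solution (n : Int) (lost : List Int) (reserve : List Int) : Int :=
  let lostSet0 : PySem.Set Int := PySem.Set.ofList lost
  let reserveSet0 : PySem.Set Int := PySem.Set.ofList reserve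
  let intersect : PySem.Set Int := PySem.Set.inter lostSet0 reserveSet0
  let lostSet : PySem.Set Int := PySem.Set.diff lostSet0 intersect
  let reserveSet : PySem.Set Int := PySem.Set.diff reserveSet0 intersect
  let final := (PySem.List.sorted lostSet (fun x => x) false).foldl solutionLoop (lostSet, reserveSet)
  n - PySem.Set.len final.1

-- ===== PORT B =====
-- Source B's while-loop over indices i (into ls) and j (into rs), transcribed as the obvious
-- recursion on the two list suffixes; returns the number of matches.
def solutionAltGo : List Int → List Int → Int
  | [], _ => 0
  | _ :: _, [] => 0
  | l :: ls, r :: rs =>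
      if r < l - 1 then solutionAltGo (l :: ls) rs
      else if r ≤ l + 1 then 1 + solutionAltGo ls rs
      else solutionAltGo ls (r :: rs)
termination_by ls rs => ls.length + rs.length

def solution_alt (n : Int) (lost : List Int) (reserve : List Int) : Int :=
  let ls := PySem.List.sorted (PySem.Set.diff (PySem.Set.ofList lost) (PySem.Set.ofList reserve)) (fun x => x) false
  let rs := PySem.List.sorted (PySem.Set.diff (PySem.Set.ofList reserve) (PySem.Set.ofList lost)) (fun x => x) false
  n - ((ls.length : Int) - solutionAltGo ls rs)

-- ===== PRECONDITION & SPEC =====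
def Spec_solution (n : Int) (lost : List Int) (reserve : List Int) (out : Int) : Prop := out = solution_alt n lost reserve
instance (n : Int) (lost : List Int) (reserve : List Int) (out : Int) : Decidable (Spec_solution n lost reserve out) := by unfold Spec_solution; infer_instance

-- ===== CLAIM (what is proved, stated in full; the proofs are below) =====
def Claim_equal_solution : Prop := ∀ (n : Int) (lost : List Int) (reserve : List Int), Dom_solution n lost reserve → Spec_solution n lost reserve (solution n lost reserve)

-- ===== LEMMAS AND PROOFS =====

-- B's merge matches nothing when no spares remain
lemma go_nil_right (L : List Int) : solutionAltGo L [] = 0 := by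
  cases L <;> simp [solutionAltGo]

-- a weakly sorted list without duplicates is strictly sorted
lemma pairwise_lt_of_le (l : List Int) (hle : l.Pairwise (· ≤ ·)) (hn : l.Nodup) :
    l.Pairwise (· < ·) := by
  induction l with
  | nil => simp
  | cons a t ih =>
      rw [List.pairwise_cons] at hle ⊢
      rw [List.nodup_cons] at hn
      exact ⟨fun b hb => lt_of_le_of_ne (hle.1 b hb) (fun h => hn.1 (h ▸ hb)), ih hle.2 hn.2⟩

-- length of discarding a present element from a Nodup list
lemma length_discard_of_mem {s : PySem.Set Int} {x : Int} (hn : s.Nodup) (hx : x ∈ s) :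
    ((PySem.Set.discard s x).length : Int) = (s.length : Int) - 1 := by
  induction s with
  | nil => cases hx
  | cons a t ih =>
      have ha : a ∉ t := (List.nodup_cons.mp hn).1
      have ht : t.Nodup := (List.nodup_cons.mp hn).2
      by_cases hax : a = x
      · subst hax
        have hft : t.filter (fun y => !(y == a)) = t :=
          List.filter_eq_self.mpr (fun y hy => by
            simp only [Bool.not_eq_eq_eq_not, Bool.not_true, beq_eq_false_iff_ne, ne_eq]
            exact fun h => ha (h ▸ hy))
        simp only [PySem.Set.discard, List.filter_cons] at hft ⊢
        simp [hft]
      · have hxt : x ∈ t := by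
          rcases List.mem_cons.mp hx with h | h
          · exact absurd h.symm hax
          · exact h
        have hstep : PySem.Set.discard (a :: t) x = a :: PySem.Set.discard t x := by
          simp [PySem.Set.discard, hax]
        rw [hstep]
        simp only [List.length_cons]
        push_cast
        have := ih ht hxt
        push_cast at this
        omega

-- core correspondence: A's greedy fold over the sorted lost list and B's two-pointer merge
-- remove/match the same number of students.  Invariant: every element of R is still in rs,
-- and every element of rs is either in R or too small (< s-1 for every remaining student s).
lemma loop_corr (L : List Int) :
    ∀ (R : List Int) (ls rs : PySem.Set Int),
    List.Pairwise (· < ·) L → List.Pairwise (· < ·) R →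
    ls.Nodup → (∀ x ∈ L, x ∈ ls) → (∀ x ∈ L, x ∉ rs) →
    (∀ x ∈ R, x ∈ rs) → (∀ x ∈ rs, x ∈ R ∨ ∀ s ∈ L, x < s - 1) →
    ((L.foldl solutionLoop (ls, rs)).1.length : Int)
      = (ls.length : Int) - solutionAltGo L R := by
  induction L with
  | nil => intro R ls rs _ _ _ _ _ _ _; simp [solutionAltGo]
  | cons l L' ihL =>
      intro R
      induction R with
      | nil =>
          intro ls rs hL _ hlsN hLls hLrs hRrs hrsR
          have h1 : l - 1 ∉ rs := fun h => by
            rcases hrsR _ h with h' | h'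
            · cases h'
            · exact absurd (h' l (List.mem_cons_self ..)) (by omega)
          have h2 : l + 1 ∉ rs := fun h => by
            rcases hrsR _ h with h' | h'
            · cases h'
            · exact absurd (h' l (List.mem_cons_self ..)) (by omega)
          rw [List.foldl_cons, show solutionLoop (ls, rs) l = (ls, rs) by
            simp [solutionLoop, h1, h2]]
          rw [ihL [] ls rs (List.pairwise_cons.mp hL).2 (by simp) hlsN
                (fun x hx => hLls x (List.mem_cons_of_mem _ hx))
                (fun x hx => hLrs x (List.mem_cons_of_mem _ hx))
                (by simp)
                (fun x hx => by
                  rcases hrsR x hx with h | h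
                  · cases h
                  · exact Or.inr (fun s hs => h s (List.mem_cons_of_mem _ hs)))]
          simp [go_nil_right]
      | cons r R' ihR =>
          intro ls rs hL hR hlsN hLls hLrs hRrs hrsR
          have hLlt : ∀ s ∈ L', l < s := (List.pairwise_cons.mp hL).1
          have hL' : List.Pairwise (· < ·) L' := (List.pairwise_cons.mp hL).2
          have hRlt : ∀ x ∈ R', r < x := (List.pairwise_cons.mp hR).1
          have hR' : List.Pairwise (· < ·) R' := (List.pairwise_cons.mp hR).2
          have hlls : l ∈ ls := hLls l (List.mem_cons_self ..)
          have hlnrs : l ∉ rs := hLrs l (List.mem_cons_self ..)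
          -- membership of l±1 in rs reduces to membership in r :: R'
          have hmem : ∀ y : Int, l - 1 ≤ y → (y ∈ rs ↔ y ∈ r :: R') := by
            intro y hy
            constructor
            · intro h
              rcases hrsR y h with h' | h'
              · exact h'
              · exact absurd (h' l (List.mem_cons_self ..)) (by omega)
            · exact hRrs y
          by_cases hskip : r < l - 1
          · -- B skips r; A's state is unchanged for this comparison step (no foldl step yet)
            have step : solutionAltGo (l :: L') (r :: R') = solutionAltGo (l :: L') R' := by
              rw [solutionAltGo]; simp [hskip]
            rw [step]
            exact ihR ls rs hL hR' hlsN hLls hLrs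
              (fun x hx => hRrs x (List.mem_cons_of_mem _ hx))
              (fun x hx => by
                rcases hrsR x hx with h | h
                · rcases List.mem_cons.mp h with h' | h'
                  · subst h'
                    exact Or.inr (fun s hs => by
                      rcases List.mem_cons.mp hs with h'' | h''
                      · omega
                      · have := hLlt s h''; omega)
                  · exact Or.inl h'
                · exact Or.inr h)
          · by_cases hmatch : r ≤ l + 1
            · -- match: A removes r (= l-1 or l+1, r ≠ l by disjointness) and l
              have hrrs : r ∈ rs := hRrs r (List.mem_cons_self ..)
              have hrnl : r ≠ l := fun h => hlnrs (h ▸ hrrs)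
              have hAstep : solutionLoop (ls, rs) l
                  = (PySem.Set.discard ls l, PySem.Set.discard rs r) := by
                by_cases hr1 : r = l - 1
                · have : l - 1 ∈ rs := hr1 ▸ hrrs
                  simp [solutionLoop, this, hr1]
                · have hr2 : r = l + 1 := by omega
                  have h2 : l + 1 ∈ rs := hr2 ▸ hrrs
                  have h1 : l - 1 ∉ rs := fun h => by
                    have := (hmem (l - 1) (le_refl _)).mp h
                    rcases List.mem_cons.mp this with h' | h'
                    · omega
                    · have := hRlt _ h'; omega
                  simp [solutionLoop, h1, h2, hr2]
              have step : solutionAltGo (l :: L') (r :: R') = 1 + solutionAltGo L' R' := by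
                rw [solutionAltGo]; simp [hskip, hmatch]
              rw [List.foldl_cons, hAstep, step]
              have hrec := ihL R' (PySem.Set.discard ls l) (PySem.Set.discard rs r) hL' hR'
                (PySem.Set.nodup_discard ls l hlsN)
                (fun x hx => (PySem.Set.mem_discard ls l x).mpr
                  ⟨hLls x (List.mem_cons_of_mem _ hx), fun h => by
                    have := hLlt x hx; omega⟩)
                (fun x hx h => hLrs x (List.mem_cons_of_mem _ hx)
                  ((PySem.Set.mem_discard rs r x).mp h).1)
                (fun x hx => (PySem.Set.mem_discard rs r x).mpr
                  ⟨hRrs x (List.mem_cons_of_mem _ hx), fun h => by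
                    have := hRlt x hx; omega⟩)
                (fun x hx => by
                  have hxrs := ((PySem.Set.mem_discard rs r x).mp hx).1
                  have hxr := ((PySem.Set.mem_discard rs r x).mp hx).2
                  rcases hrsR x hxrs with h | h
                  · rcases List.mem_cons.mp h with h' | h'
                    · exact absurd h' hxr
                    · exact Or.inl h'
                  · exact Or.inr (fun s hs => h s (List.mem_cons_of_mem _ hs)))
              rw [hrec, length_discard_of_mem hlsN hlls]
              ring
            · -- r > l+1: A finds neither l-1 nor l+1; B advances past l
              have h1 : l - 1 ∉ rs := fun h => by
                have := (hmem (l - 1) (le_refl _)).mp h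
                rcases List.mem_cons.mp this with h' | h'
                · omega
                · have := hRlt _ h'; omega
              have h2 : l + 1 ∉ rs := fun h => by
                have := (hmem (l + 1) (by omega)).mp h
                rcases List.mem_cons.mp this with h' | h'
                · omega
                · have := hRlt _ h'; omega
              have step : solutionAltGo (l :: L') (r :: R') = solutionAltGo L' (r :: R') := by
                rw [solutionAltGo]; simp [hskip, hmatch]
              rw [List.foldl_cons, show solutionLoop (ls, rs) l = (ls, rs) by
                simp [solutionLoop, h1, h2], step]
              exact ihL (r :: R') ls rs hL' hR hlsN
                (fun x hx => hLls x (List.mem_cons_of_mem _ hx))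
                (fun x hx => hLrs x (List.mem_cons_of_mem _ hx))
                hRrs
                (fun x hx => by
                  rcases hrsR x hx with h | h
                  · exact Or.inl h
                  · exact Or.inr (fun s hs => h s (List.mem_cons_of_mem _ hs)))

-- ===== VERDICT (by name: the statement is the Claim_ definition above) =====
theorem solution_spec : Claim_equal_solution := by
  intro n lost reserve _
  unfold Spec_solution solution solution_alt
  simp only []
  set lostSet0 : PySem.Set Int := PySem.Set.ofList lost with hls0
  set reserveSet0 : PySem.Set Int := PySem.Set.ofList reserve with hrs0
  set inter : PySem.Set Int := PySem.Set.inter lostSet0 reserveSet0 with hinter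
  set lsA : PySem.Set Int := PySem.Set.diff lostSet0 inter with hlsA
  set rsA : PySem.Set Int := PySem.Set.diff reserveSet0 inter with hrsA
  set lsB : PySem.Set Int := PySem.Set.diff lostSet0 reserveSet0 with hlsB
  set rsB : PySem.Set Int := PySem.Set.diff reserveSet0 lostSet0 with hrsB
  -- the two lost-side sets are the same list up to permutation, so their sorts coincide
  have hAnodup : lsA.Nodup := PySem.Set.nodup_diff _ _ (PySem.Set.nodup_ofList lost)
  have hBnodup : lsB.Nodup := PySem.Set.nodup_diff _ _ (PySem.Set.nodup_ofList lost)
  have hmemAB : ∀ x : Int, x ∈ lsA ↔ x ∈ lsB := by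
    intro x
    simp only [hlsA, hlsB, hinter, PySem.Set.mem_diff, PySem.Set.mem_inter]
    tauto
  have hsorted : PySem.List.sorted lsA (fun x => x) false
      = PySem.List.sorted lsB (fun x => x) false := by
    apply PySem.List.sorted_eq_sorted_of_perm _ _ _ (fun a b h => h)
    exact (List.perm_ext_iff_of_nodup hAnodup hBnodup).mpr hmemAB
  set L := PySem.List.sorted lsB (fun x => x) false with hLdef
  set R := PySem.List.sorted rsB (fun x => x) false with hRdef
  rw [hsorted]
  have hLperm : L.Perm lsB := PySem.List.sorted_perm _ _ _
  have hRperm : R.Perm rsB := PySem.List.sorted_perm _ _ _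
  have hrsBnodup : rsB.Nodup := PySem.Set.nodup_diff _ _ (PySem.Set.nodup_ofList reserve)
  have hLpw : List.Pairwise (· < ·) L :=
    pairwise_lt_of_le _ (PySem.List.sorted_pairwise lsB (fun x => x))
      (hLperm.nodup_iff.mpr hBnodup)
  have hRpw : List.Pairwise (· < ·) R :=
    pairwise_lt_of_le _ (PySem.List.sorted_pairwise rsB (fun x => x))
      (hRperm.nodup_iff.mpr hrsBnodup)
  -- disjointness and the initial invariant
  have hLls : ∀ x ∈ L, x ∈ lsA := fun x hx => (hmemAB x).mpr (hLperm.mem_iff.mp hx)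
  have hLrs : ∀ x ∈ L, x ∉ rsA := by
    intro x hx h
    have h1 : x ∈ lsB := hLperm.mem_iff.mp hx
    simp only [hlsB, hrsA, hinter, PySem.Set.mem_diff, PySem.Set.mem_inter] at h1 h
    tauto
  have hRrs : ∀ x ∈ R, x ∈ rsA := by
    intro x hx
    have h1 : x ∈ rsB := hRperm.mem_iff.mp hx
    simp only [hrsB, hrsA, hinter, PySem.Set.mem_diff, PySem.Set.mem_inter] at h1 ⊢
    tauto
  have hrsR : ∀ x ∈ rsA, x ∈ R ∨ ∀ s ∈ L, x < s - 1 := by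
    intro x hx
    left
    rw [hRperm.mem_iff]
    simp only [hrsA, hrsB, hinter, PySem.Set.mem_diff, PySem.Set.mem_inter] at hx ⊢
    tauto
  have hcorr := loop_corr L R lsA rsA hLpw hRpw hAnodup hLls hLrs hRrs hrsR
  have hlen : (lsA.length : Int) = (L.length : Int) := by
    have h := (List.perm_ext_iff_of_nodup hAnodup hBnodup).mpr hmemAB
    rw [hLperm.length_eq, h.length_eq]
  simp only [PySem.Set.len]
  omega
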